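-- pv_equiv track=rewrite | github.com/190050061-renu-k/cs753assignment1 | 2D/wol_index.py | find
-- ===== SOURCE A (Python) =====
-- def find(dictionary,words):
--     occurences = [None]*len(words)
--     count = 0
--     for key, value in dictionary.items():
--         for idx in range(0,len(words),1):
--             if(occurences[idx]==None):
--                 try:
--                     t_idx = value.index(words[idx])
--                     occurences[idx] = key+" "+str(t_idx)
--                     count += 1
--                 except:
--                     pass
--     return occurences
-- ===== SOURCE B (Python) =====
-- def find(dictionary, words):
--     def first(w):
--         for key, value in dictionary.items():
--             try:
--                 return key + " " + str(value.index(w))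
--             except ValueError:
--                 continue
--         return None
--     return [first(w) for w in words]
-- ===== Notes on version B (the rewrite author's own statement) =====
-- stated objective: alternative
-- what changed: B is word-major: for each word it scans the dictionary and returns at the first entry containing it, instead of A's entry-major single scan that probes every word per entry under a None-guard.
import Mathlib
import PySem

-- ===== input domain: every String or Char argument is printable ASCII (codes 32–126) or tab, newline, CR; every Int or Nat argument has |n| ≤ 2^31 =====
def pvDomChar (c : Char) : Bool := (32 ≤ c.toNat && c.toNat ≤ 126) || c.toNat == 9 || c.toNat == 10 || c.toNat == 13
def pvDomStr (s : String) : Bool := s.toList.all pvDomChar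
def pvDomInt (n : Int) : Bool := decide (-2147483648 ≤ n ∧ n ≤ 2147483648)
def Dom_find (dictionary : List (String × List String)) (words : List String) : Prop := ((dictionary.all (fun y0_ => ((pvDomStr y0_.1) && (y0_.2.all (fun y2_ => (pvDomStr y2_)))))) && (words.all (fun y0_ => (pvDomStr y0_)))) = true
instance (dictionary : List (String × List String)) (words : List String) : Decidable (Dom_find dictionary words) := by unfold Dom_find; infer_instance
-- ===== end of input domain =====

-- B is word-major (first containing entry per word) instead of A's entry-major scan; same values, alternative decomposition.


-- ===== PORT A =====
-- inner-loop body: 'if occurences[idx]==None: try: t_idx = value.index(words[idx]); occurences[idx] = key+" "+str(t_idx) except: pass'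
-- (indices are always in range here, so pyGetD/pySetD coincide with Python's indexing; the bare except only ever catches .index's ValueError, ported as index? = none)
def findStepA (key : String) (value : List String) (words : List String) (occ : List (Option String)) (idx : Int) : List (Option String) :=
  if PySem.List.pyGetD occ idx none = none then
    match PySem.List.index? value (PySem.List.pyGetD words idx "") with
    | some t => PySem.List.pySetD occ idx (some (key ++ " " ++ PySem.Int.toStr (t : Int)))
    | none => occ
  else occ

def find (dictionary : List (String × List String)) (words : List String) : List (Option String) :=
  dictionary.foldl (fun occ kv =>
    (PySem.List.pyRange 0 (words.length : Int) 1).foldl (findStepA kv.1 kv.2 words) occ)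
    (List.replicate words.length none)

-- ===== PORT B =====
-- 'for key, value in dictionary.items(): try: return key+" "+str(value.index(w)) except ValueError: continue; return None'
def firstOcc (dictionary : List (String × List String)) (w : String) : Option String :=
  match dictionary with
  | [] => none
  | (key, value) :: rest =>
    match PySem.List.index? value w with
    | some t => some (key ++ " " ++ PySem.Int.toStr (t : Int))
    | none => firstOcc rest w

def find_alt (dictionary : List (String × List String)) (words : List String) : List (Option String) :=
  words.map (firstOcc dictionary)

-- ===== PRECONDITION & SPEC =====
def Spec_find (dictionary : List (String × List String)) (words : List String) (out : List (Option String)) : Prop := out = find_alt dictionary words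
instance (dictionary : List (String × List String)) (words : List String) (out : List (Option String)) : Decidable (Spec_find dictionary words out) := by unfold Spec_find; infer_instance

-- ===== CLAIM (what is proved, stated in full; the proofs are below) =====
def Claim_equal_find : Prop := ∀ (dictionary : List (String × List String)) (words : List String), Dom_find dictionary words → Spec_find dictionary words (find dictionary words)

-- ===== LEMMAS AND PROOFS =====

-- what one dictionary entry contributes for word w
def entryHit (key : String) (value : List String) (w : String) : Option String :=
  (PySem.List.index? value w).map (fun t => key ++ " " ++ PySem.Int.toStr (t : Int))

-- one pass of A's inner loop updates each slot pointwise
theorem findStepA_set (key : String) (value : List String) (words : List String)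
    (occ : List (Option String)) (a : Nat) (ha : a < occ.length) (hlen : occ.length = words.length) :
    findStepA key value words occ (a : Int)
      = occ.set a (Option.or (occ.getD a none) (entryHit key value (words.getD a ""))) := by
  have hg : PySem.List.pyGetD occ (a : Int) none = occ.getD a none := by
    simp [pysem, List.getD, ha]
  have hw : PySem.List.pyGetD words (a : Int) "" = words.getD a "" := by
    simp [pysem, List.getD, hlen ▸ ha]
  unfold findStepA entryHit
  rw [hg, hw]
  have hget : occ.getD a none = occ[a] := List.getD_eq_getElem occ none ha
  rcases h : occ.getD a none with _ | s
  · rw [if_pos rfl]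
    rcases hi : PySem.List.index? value (words.getD a "") with _ | t
    · have hset : occ.set a none = occ := by
        conv_lhs => rw [← h, hget]
        exact List.set_getElem_self ha
      simp [hset]
    · simp [pysem]
  · rw [if_neg (by simp)]
    have hset : occ.set a (some s) = occ := by
      conv_lhs => rw [← h, hget]
      exact List.set_getElem_self ha
    simp [Option.or, hset]

theorem inner_loop_eq (key : String) (value : List String) (words : List String) :
    ∀ (n a : Nat) (occ : List (Option String)), occ.length = words.length → n = words.length - a →
    (List.range' a n).foldl (fun occ (k : Nat) => findStepA key value words occ (k : Int)) occ
      = occ.take a ++ List.zipWith (fun o w => Option.or o (entryHit key value w)) (occ.drop a) (words.drop a) := by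
  intro n
  induction n with
  | zero =>
    intro a occ hl hn
    have hle : occ.length ≤ a := by omega
    simp [List.take_of_length_le hle, List.drop_of_length_le hle]
  | succ n ih =>
    intro a occ hl hn
    have ha : a < occ.length := by omega
    have haw : a < words.length := by omega
    rw [List.range'_succ, List.foldl_cons, findStepA_set key value words occ a ha hl,
        ih (a + 1) _ (by simp [hl]) (by omega)]
    rw [List.getD_eq_getElem occ none ha, List.getD_eq_getElem words "" haw]
    rw [List.drop_set]
    rw [if_pos (by omega)]
    rw [List.take_set, List.take_add_one, List.getElem?_eq_getElem ha]
    rw [List.set_append_right a _ (by simp [List.length_take])]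
    rw [List.drop_eq_getElem_cons ha, List.drop_eq_getElem_cons haw, List.zipWith_cons_cons]
    have h0 : a - min a occ.length = 0 := by omega
    simp [h0]

theorem zipWith_comp (F G : Option String → String → Option String)
    (occ : List (Option String)) (words : List String) :
    List.zipWith G (List.zipWith F occ words) words = List.zipWith (fun o w => G (F o w) w) occ words := by
  induction occ generalizing words with
  | nil => simp
  | cons o os ih => cases words <;> simp [ih]

theorem zipWith_fst_eq (occ : List (Option String)) (words : List String)
    (h : occ.length = words.length) :
    List.zipWith (fun (o : Option String) (_ : String) => o) occ words = occ := by
  induction occ generalizing words with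
  | nil => rfl
  | cons o os ih => cases words with
    | nil => simp at h
    | cons w ws => simp at h; simp [ih ws h]

theorem outer_loop_eq (words : List String) :
    ∀ (dict : List (String × List String)) (occ : List (Option String)), occ.length = words.length →
    dict.foldl (fun occ kv =>
        (PySem.List.pyRange 0 (words.length : Int) 1).foldl (findStepA kv.1 kv.2 words) occ) occ
      = List.zipWith (fun o w => Option.or o (firstOcc dict w)) occ words := by
  intro dict
  induction dict with
  | nil =>
    intro occ h
    simp only [List.foldl_nil, firstOcc, Option.or_none]
    exact (zipWith_fst_eq occ words h).symm
  | cons kv rest ih =>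
    obtain ⟨k, v⟩ := kv
    intro occ h
    rw [List.foldl_cons]
    have hin : (PySem.List.pyRange 0 (words.length : Int) 1).foldl (findStepA k v words) occ
        = List.zipWith (fun o w => Option.or o (entryHit k v w)) occ words := by
      rw [PySem.List.pyRange_zero_natCast, List.foldl_map, List.range_eq_range']
      simpa using inner_loop_eq k v words words.length 0 occ h (by omega)
    rw [hin, ih _ (by simp [h]), zipWith_comp]
    have hfun : (fun (o : Option String) (w : String) =>
          Option.or (Option.or o (entryHit k v w)) (firstOcc rest w))
        = fun o w => Option.or o (firstOcc ((k, v) :: rest) w) := by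
      funext o w
      rw [Option.or_assoc]
      congr 1
      simp only [firstOcc, entryHit]
      rcases PySem.List.index? v w with _ | t <;> simp
    rw [hfun]

theorem zipWith_replicate_map (h : String → Option String) (words : List String) :
    List.zipWith (fun (o : Option String) w => Option.or o (h w)) (List.replicate words.length none) words
      = words.map h := by
  induction words with
  | nil => rfl
  | cons w ws ih => simp [List.replicate_succ, ih]

-- ===== VERDICT (by name: the statement is the Claim_ definition above) =====
theorem find_spec : Claim_equal_find := by
  intro dictionary words _
  unfold Spec_find find find_alt
  rw [outer_loop_eq words dictionary _ (by simp), zipWith_replicate_map]
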